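-- pv_equiv track=rewrite | github.com/m-ttaylor/adventofcode | 2025/10/solution.py | bfs
-- ===== SOURCE A (Python) =====
-- def bfs(goal, buttons):
--     visited = set()
--     state = 0
--     queue = [(state, 0)]
--     steps = 0
--     while queue:
--         state, steps = queue.pop(0)
--         for button in buttons:
--             newState = state ^ button
--             if newState == goal:
--                 return steps + 1
--             if newState not in visited:
--                 queue.append((newState, steps + 1))
--                 visited.add(newState)
-- ===== SOURCE B (Python) =====
-- def bfs(goal, buttons):
--     # Iterate the whole set reachable in exactly k presses (no queue, no
--     # visited-set pruning); stop on goal or when a level adds nothing new.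
--     cur = {0}
--     seen = {0}
--     steps = 0
--     while True:
--         cur = {s ^ b for s in cur for b in buttons}
--         steps += 1
--         if goal in cur:
--             return steps
--         if cur <= seen:
--             return None
--         seen |= cur
-- ===== Notes on version B (the rewrite author's own statement) =====
-- stated objective: alternative
-- what changed: Replaces A's FIFO queue of (state, steps) pairs with a visited-set-pruned node-by-node BFS by a pruning-free fixed-point iteration: B repeatedly maps the entire set reachable in exactly k presses through all buttons (set image), returning k when the goal appears and None when a level contributes no state not seen before.
import Mathlib
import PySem

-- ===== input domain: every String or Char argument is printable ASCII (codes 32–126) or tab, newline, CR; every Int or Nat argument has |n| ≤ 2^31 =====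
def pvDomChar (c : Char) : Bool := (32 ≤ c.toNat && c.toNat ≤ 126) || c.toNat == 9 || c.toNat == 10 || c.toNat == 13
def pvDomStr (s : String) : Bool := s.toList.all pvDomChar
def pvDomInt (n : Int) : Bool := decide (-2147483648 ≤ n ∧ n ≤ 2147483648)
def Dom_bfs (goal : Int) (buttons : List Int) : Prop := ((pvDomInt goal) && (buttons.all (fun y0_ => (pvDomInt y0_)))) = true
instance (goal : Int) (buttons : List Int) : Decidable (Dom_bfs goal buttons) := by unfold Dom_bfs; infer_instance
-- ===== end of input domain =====

-- B drops A's FIFO queue, per-node step tags and visited-set pruning entirely: it iterates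
-- the full SET of states reachable in exactly k presses (a set image per level) and stops
-- when the goal appears or a level adds no state not seen before; same return value.
-- Both loops carry a fuel argument solely to make the recursion structural; the fuel is
-- proved sufficient, so it never changes the computed value.

-- ===== PORT A =====
-- inner 'for button in buttons' loop of A: returns .inl (steps+1) on goal,
-- otherwise the queue (appended at the back) and visited after the loop
def runButtonsA (goal state steps : Int) : List Int → List (Int × Int) → List Int →
    Sum Int (List (Int × Int) × List Int)
  | [], q, v => .inr (q, v)
  | b :: bs, q, v =>
    let newState := PySem.Int.bxor state b
    if newState = goal then .inl (steps + 1)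
    else if newState ∈ v then runButtonsA goal state steps bs q v
    else runButtonsA goal state steps bs (q ++ [(newState, steps + 1)]) (v ++ [newState])

-- A's 'while queue' loop: pop the front pair, run the button loop, continue with the rest
def loopA (goal : Int) (buttons : List Int) : Nat → List (Int × Int) → List Int →
    Option (Option Int)
  | 0, _, _ => none            -- fuel exhausted (proved unreachable for the fuel bfs uses)
  | _ + 1, [], _ => some none  -- queue empty: Python falls off the loop, returns None
  | f + 1, (state, steps) :: rest, v =>
    match runButtonsA goal state steps buttons rest v with
    | .inl r => some (some r)
    | .inr (q', v') => loopA goal buttons f q' v'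

def bfs (goal : Int) (buttons : List Int) : Option Int :=
  match loopA goal buttons (2 ^ 33 + 2) [(0, 0)] [] with
  | some r => r
  | none => none

-- ===== PORT B =====
-- B's set comprehension {s ^ b for s in cur for b in buttons}
def stepB (buttons : List Int) (cur : List Int) : List Int :=
  cur.foldl (fun acc s =>
    buttons.foldl (fun acc2 b => PySem.Set.add acc2 (PySem.Int.bxor s b)) acc) []

-- B's 'while True' loop over whole exactly-k-reachable sets
def loopB (goal : Int) (buttons : List Int) : Nat → List Int → List Int → Int →
    Option (Option Int)
  | 0, _, _, _ => none         -- fuel exhausted (proved unreachable for the fuel bfs_alt uses)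
  | f + 1, cur, seen, steps =>
    let nxt := stepB buttons cur
    if goal ∈ nxt then some (some (steps + 1))
    else if PySem.Set.issubset nxt seen then some none
    else loopB goal buttons f nxt (PySem.Set.update seen nxt) (steps + 1)

def bfs_alt (goal : Int) (buttons : List Int) : Option Int :=
  match loopB goal buttons (2 ^ 33 + 3) [0] [0] 0 with
  | some r => r
  | none => none

-- ===== PRECONDITION & SPEC =====
def Spec_bfs (goal : Int) (buttons : List Int) (out : Option Int) : Prop := out = bfs_alt goal buttons
instance (goal : Int) (buttons : List Int) (out : Option Int) : Decidable (Spec_bfs goal buttons out) := by unfold Spec_bfs; infer_instance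

-- ===== CLAIM (what is proved, stated in full; the proofs are below) =====
def Claim_equal_bfs : Prop := ∀ (goal : Int) (buttons : List Int), Dom_bfs goal buttons → Spec_bfs goal buttons (bfs goal buttons)

-- ===== LEMMAS AND PROOFS =====

-- E k = set of states reachable by exactly k button presses; U k = reachable within k
def Xs (bt : List Int) (S : Finset Int) : Finset Int :=
  S.biUnion (fun x => (bt.map (PySem.Int.bxor x)).toFinset)

def Ek (bt : List Int) : Nat → Finset Int
  | 0 => {0}
  | k + 1 => Xs bt (Ek bt k)

def Uk (bt : List Int) : Nat → Finset Int
  | 0 => {0}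
  | k + 1 => Uk bt k ∪ Ek bt (k + 1)

-- the common correctness spec: 'o is the right answer'
def Good (goal : Int) (bt : List Int) (o : Option Int) : Prop :=
  match o with
  | some r => ∃ k : Nat, r = (k : Int) + 1 ∧ goal ∈ Ek bt (k + 1) ∧
      ∀ j : Nat, 1 ≤ j → j ≤ k → goal ∉ Ek bt j
  | none => ∀ j : Nat, 1 ≤ j → goal ∉ Ek bt j

theorem mem_Xs {bt : List Int} {S : Finset Int} {y : Int} :
    y ∈ Xs bt S ↔ ∃ x ∈ S, ∃ b ∈ bt, y = PySem.Int.bxor x b := by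
  simp only [Xs, Finset.mem_biUnion, List.mem_toFinset, List.mem_map]
  constructor
  · rintro ⟨x, hx, b, hb, rfl⟩; exact ⟨x, hx, b, hb, rfl⟩
  · rintro ⟨x, hx, b, hb, rfl⟩; exact ⟨x, hx, b, hb, rfl⟩

theorem mem_Ek_succ {bt : List Int} {k : Nat} {y : Int} :
    y ∈ Ek bt (k + 1) ↔ ∃ x ∈ Ek bt k, ∃ b ∈ bt, y = PySem.Int.bxor x b := by
  simp only [Ek]; exact mem_Xs

theorem bxor_zero_left (b : Int) : PySem.Int.bxor 0 b = b := by
  rw [PySem.Int.bxor_comm, PySem.Int.bxor_zero]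

theorem mem_Ek_one {bt : List Int} {y : Int} : y ∈ Ek bt 1 ↔ y ∈ bt := by
  rw [mem_Ek_succ]
  constructor
  · rintro ⟨x, hx, b, hb, rfl⟩
    simp only [Ek, Finset.mem_singleton] at hx
    subst hx; rw [bxor_zero_left]; exact hb
  · intro hy
    exact ⟨0, by simp [Ek], y, hy, (bxor_zero_left y).symm⟩

theorem zero_mem_Ek_two {bt : List Int} (h : bt ≠ []) : (0 : Int) ∈ Ek bt 2 := by
  obtain ⟨b, bs, rfl⟩ := List.exists_cons_of_ne_nil h
  exact mem_Ek_succ.mpr ⟨b, mem_Ek_one.mpr (by simp), b, by simp,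
    (PySem.Int.bxor_self b).symm⟩

theorem mem_Uk {bt : List Int} {k : Nat} {y : Int} :
    y ∈ Uk bt k ↔ ∃ j ≤ k, y ∈ Ek bt j := by
  induction k with
  | zero =>
    simp only [Uk]
    constructor
    · intro h; exact ⟨0, le_refl _, by simpa [Ek] using h⟩
    · rintro ⟨j, hj, hy⟩; interval_cases j; simpa [Ek] using hy
  | succ k ih =>
    simp only [Uk, Finset.mem_union, ih]
    constructor
    · rintro (⟨j, hj, hy⟩ | hy)
      · exact ⟨j, by omega, hy⟩
      · exact ⟨k + 1, le_refl _, hy⟩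
    · rintro ⟨j, hj, hy⟩
      rcases Nat.lt_or_ge j (k + 1) with h | h
      · exact .inl ⟨j, by omega, hy⟩
      · have : j = k + 1 := by omega
        subst this; exact .inr hy

theorem Ek_sub_Uk {bt : List Int} {k : Nat} : Ek bt k ⊆ Uk bt k :=
  fun y hy => mem_Uk.mpr ⟨k, le_refl _, hy⟩

theorem Uk_mono {bt : List Int} {j k : Nat} (h : j ≤ k) : Uk bt j ⊆ Uk bt k := by
  intro y hy
  obtain ⟨i, hi, hyi⟩ := mem_Uk.mp hy
  exact mem_Uk.mpr ⟨i, by omega, hyi⟩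

theorem Xs_mono {bt : List Int} {S T : Finset Int} (h : S ⊆ T) : Xs bt S ⊆ Xs bt T := by
  intro y hy
  obtain ⟨x, hx, b, hb, rfl⟩ := mem_Xs.mp hy
  exact mem_Xs.mpr ⟨x, h hx, b, hb, rfl⟩

theorem Xs_Uk_sub {bt : List Int} {k : Nat} : Xs bt (Uk bt k) ⊆ Uk bt (k + 1) := by
  intro y hy
  obtain ⟨x, hx, b, hb, rfl⟩ := mem_Xs.mp hy
  obtain ⟨j, hj, hxj⟩ := mem_Uk.mp hx
  have : PySem.Int.bxor x b ∈ Ek bt (j + 1) := mem_Ek_succ.mpr ⟨x, hxj, b, hb, rfl⟩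
  exact Uk_mono (by omega) (Ek_sub_Uk this)

-- once a level adds nothing new, every later level stays inside Uk k
theorem Ek_closure {bt : List Int} {k : Nat} (h : Ek bt (k + 1) ⊆ Uk bt k) :
    ∀ t, Ek bt (k + 1 + t) ⊆ Uk bt k := by
  intro t
  induction t with
  | zero => exact h
  | succ t ih =>
    have h1 : Ek bt (k + 1 + t + 1) ⊆ Xs bt (Uk bt k) := by
      show Xs bt (Ek bt (k + 1 + t)) ⊆ _
      exact Xs_mono ih
    intro y hy
    have hy2 := Xs_Uk_sub (h1 hy)
    simp only [Uk, Finset.mem_union] at hy2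
    rcases hy2 with hy2 | hy2
    · exact hy2
    · exact h hy2

-- if no level ≤ k+1 contains the goal and level k+1 adds nothing new, no level ever does
theorem no_goal_forever {goal : Int} {bt : List Int} {k : Nat}
    (hclosed : Ek bt (k + 1) ⊆ Uk bt k)
    (hno : ∀ j : Nat, 1 ≤ j → j ≤ k + 1 → goal ∉ Ek bt j) :
    ∀ j : Nat, 1 ≤ j → goal ∉ Ek bt j := by
  intro j hj hgoal
  rcases Nat.lt_or_ge j (k + 2) with hlt | hge
  · exact hno j hj (by omega) hgoal
  · have hsub : Ek bt j ⊆ Uk bt k := by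
      have : j = k + 1 + (j - (k + 1)) := by omega
      rw [this]; exact Ek_closure hclosed _
    obtain ⟨i, hi, hgi⟩ := mem_Uk.mp (hsub hgoal)
    rcases Nat.eq_zero_or_pos i with rfl | hpos
    · -- goal = 0; then buttons must be empty, else 0 ∈ Ek 2 contradicts hno
      simp only [Ek, Finset.mem_singleton] at hgi
      subst hgi
      by_cases hbt : bt = []
      · subst hbt
        have hemp : ∀ m : Nat, Ek ([] : List Int) (m + 1) = ∅ := by
          intro m
          rw [Finset.eq_empty_iff_forall_notMem]
          intro y hy
          obtain ⟨x, -, b, hb, -⟩ := mem_Ek_succ.mp hy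
          simp at hb
        obtain ⟨m, rfl⟩ := Nat.exists_eq_add_of_le hj
        rw [Nat.add_comm] at hgoal
        rw [hemp m] at hgoal
        exact absurd hgoal (Finset.notMem_empty _)
      · have h2 := zero_mem_Ek_two (bt := bt) hbt
        rcases Nat.lt_or_ge k 1 with hk | hk
        · -- k = 0 : E 1 ⊆ {0} and 0 ∉ E 1 force E 1 = ∅, impossible for bt ≠ []
          have hk0 : k = 0 := by omega
          subst hk0
          obtain ⟨b, bs, rfl⟩ := List.exists_cons_of_ne_nil hbt
          have hb1 : b ∈ Ek (b :: bs) 1 := mem_Ek_one.mpr (by simp)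
          have hbU : b ∈ Uk (b :: bs) 0 := hclosed hb1
          simp only [Uk, Finset.mem_singleton] at hbU
          subst hbU
          exact hno 1 (by omega) (by omega) hb1
        · exact hno 2 (by omega) (by omega) h2
    · exact hno i hpos (by omega) hgi

-- two Good answers agree
theorem good_unique {goal : Int} {bt : List Int} {o1 o2 : Option Int}
    (h1 : Good goal bt o1) (h2 : Good goal bt o2) : o1 = o2 := by
  cases o1 with
  | none =>
    cases o2 with
    | none => rfl
    | some r =>
      obtain ⟨k, _, hk, _⟩ := h2
      exact absurd hk (h1 (k + 1) (by omega))
  | some r =>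
    cases o2 with
    | none =>
      obtain ⟨k, _, hk, _⟩ := h1
      exact absurd hk (h2 (k + 1) (by omega))
    | some r2 =>
      obtain ⟨k1, rfl, hk1, hmin1⟩ := h1
      obtain ⟨k2, rfl, hk2, hmin2⟩ := h2
      have : k1 = k2 := by
        rcases Nat.lt_trichotomy k1 k2 with h | h | h
        · exact absurd hk1 (hmin2 (k1 + 1) (by omega) (by omega))
        · exact h
        · exact absurd hk2 (hmin1 (k2 + 1) (by omega) (by omega))
      subst this; rfl

-- range bound: every value occurring anywhere is a 33-bit-window integer
def inR (x : Int) : Prop := -(2 ^ 32) ≤ x ∧ x < 2 ^ 32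

theorem inR_zero : inR 0 := ⟨by norm_num, by norm_num⟩

theorem bxor_inR {x y : Int} (hx : inR x) (hy : inR y) : inR (PySem.Int.bxor x y) := by
  obtain ⟨hx1, hx2⟩ := hx; obtain ⟨hy1, hy2⟩ := hy
  unfold PySem.Int.bxor inR
  split_ifs with h1 h2 h2
  · have h := Nat.xor_lt_two_pow (x := x.toNat) (y := y.toNat) (n := 32) (by omega) (by omega)
    omega
  · have h := Nat.xor_lt_two_pow (x := x.toNat) (y := (-y - 1).toNat) (n := 32) (by omega) (by omega)
    omega
  · have h := Nat.xor_lt_two_pow (x := (-x - 1).toNat) (y := y.toNat) (n := 32) (by omega) (by omega)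
    omega
  · have h := Nat.xor_lt_two_pow (x := (-x - 1).toNat) (y := (-y - 1).toNat) (n := 32) (by omega) (by omega)
    omega

theorem length_le_of_inR {v : List Int} (hnd : v.Nodup) (hr : ∀ x ∈ v, inR x) :
    v.length ≤ 2 ^ 33 := by
  have hsub : v.toFinset ⊆ Finset.Icc (-(2 ^ 32) : Int) (2 ^ 32 - 1) := by
    intro x hx
    have hx2 := hr x (List.mem_toFinset.mp hx)
    unfold inR at hx2
    simp only [Finset.mem_Icc]
    omega
  have hcard := Finset.card_le_card hsub
  rw [List.toFinset_card_of_nodup hnd] at hcard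
  simpa [Int.card_Icc] using hcard

theorem Ek_inR {bt : List Int} (hb : ∀ b ∈ bt, inR b) :
    ∀ k, ∀ x ∈ Ek bt k, inR x := by
  intro k
  induction k with
  | zero => intro x hx; simp only [Ek, Finset.mem_singleton] at hx; subst hx; exact inR_zero
  | succ k ih =>
    intro x hx
    obtain ⟨z, hz, b, hbm, rfl⟩ := mem_Ek_succ.mp hx
    exact bxor_inR (ih z hz) (hb b hbm)

theorem Uk_inR {bt : List Int} (hb : ∀ b ∈ bt, inR b) {k : Nat} :
    ∀ x ∈ Uk bt k, inR x := by
  intro x hx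
  obtain ⟨j, _, hxj⟩ := mem_Uk.mp hx
  exact Ek_inR hb j x hxj

-- ---------- B side ----------

theorem stepB_eq_foldl_update (bt : List Int) (cur : List Int) :
    stepB bt cur = cur.foldl (fun acc s => PySem.Set.update acc (bt.map (PySem.Int.bxor s))) [] := by
  unfold stepB
  congr 1
  funext acc s
  rw [PySem.Set.update_map_eq_foldl_add]

theorem foldl_update_mem (bt : List Int) :
    ∀ (cur : List Int) (acc : List Int) (y : Int),
      y ∈ cur.foldl (fun acc s => PySem.Set.update acc (bt.map (PySem.Int.bxor s))) acc ↔
        y ∈ acc ∨ ∃ s ∈ cur, ∃ b ∈ bt, y = PySem.Int.bxor s b := by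
  intro cur
  induction cur with
  | nil => intro acc y; simp
  | cons s xs ih =>
    intro acc y
    simp only [List.foldl_cons, ih, PySem.Set.mem_update, List.mem_map, List.mem_cons]
    constructor
    · rintro ((hy | ⟨b, hb, rfl⟩) | ⟨s', hs', b, hb, rfl⟩)
      · exact .inl hy
      · exact .inr ⟨s, .inl rfl, b, hb, rfl⟩
      · exact .inr ⟨s', .inr hs', b, hb, rfl⟩
    · rintro (hy | ⟨s', (rfl | hs'), b, hb, rfl⟩)
      · exact .inl (.inl hy)
      · exact .inl (.inr ⟨b, hb, rfl⟩)
      · exact .inr ⟨s', hs', b, hb, rfl⟩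

theorem mem_stepB {bt cur : List Int} {y : Int} :
    y ∈ stepB bt cur ↔ ∃ s ∈ cur, ∃ b ∈ bt, y = PySem.Int.bxor s b := by
  rw [stepB_eq_foldl_update, foldl_update_mem]
  simp

theorem issubset_true_iff {s t : List Int} :
    PySem.Set.issubset s t = true ↔ ∀ x ∈ s, x ∈ t := by
  unfold PySem.Set.issubset
  simp

-- main B-side invariant: loopB computes a Good answer
theorem loopB_good (goal : Int) (bt : List Int) (hb : ∀ b ∈ bt, inR b) :
    ∀ (f : Nat) (cur seen : List Int) (k : Nat),
      (∀ y, y ∈ cur ↔ y ∈ Ek bt k) →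
      seen.Nodup → (∀ y, y ∈ seen ↔ y ∈ Uk bt k) →
      (∀ j : Nat, 1 ≤ j → j ≤ k → goal ∉ Ek bt j) →
      2 ^ 33 + 2 ≤ f + seen.length →
      ∃ o, loopB goal bt f cur seen (k : Int) = some o ∧ Good goal bt o := by
  intro f
  induction f with
  | zero =>
    intro cur seen k hcur hnd hseen hno hf
    exfalso
    have := length_le_of_inR hnd (fun x hx => Uk_inR hb x ((hseen x).mp hx))
    omega
  | succ f ih =>
    intro cur seen k hcur hnd hseen hno hf
    have hnxt : ∀ y, y ∈ stepB bt cur ↔ y ∈ Ek bt (k + 1) := by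
      intro y
      rw [mem_stepB, mem_Ek_succ]
      constructor
      · rintro ⟨s, hs, b, hbm, rfl⟩; exact ⟨s, (hcur s).mp hs, b, hbm, rfl⟩
      · rintro ⟨s, hs, b, hbm, rfl⟩; exact ⟨s, (hcur s).mpr hs, b, hbm, rfl⟩
    simp only [loopB]
    split_ifs with hgoal hsub
    · -- hit: return k + 1
      refine ⟨some ((k : Int) + 1), rfl, k, rfl, (hnxt goal).mp hgoal, hno⟩
    · -- no new states: return none
      have hclosed : Ek bt (k + 1) ⊆ Uk bt k := by
        intro y hy
        have := (issubset_true_iff.mp hsub) y ((hnxt y).mpr hy)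
        exact (hseen y).mp this
      refine ⟨none, rfl, ?_⟩
      exact no_goal_forever hclosed (fun j h1 h2 hg => by
        rcases Nat.lt_or_ge j (k + 1) with h | h
        · exact hno j h1 (by omega) hg
        · have : j = k + 1 := by omega
          subst this
          exact hgoal ((hnxt goal).mpr hg))
    · -- recurse at level k + 1
      have hnd' : (PySem.Set.update seen (stepB bt cur)).Nodup := PySem.Set.nodup_update _ _ hnd
      have hseen' : ∀ y, y ∈ PySem.Set.update seen (stepB bt cur) ↔ y ∈ Uk bt (k + 1) := by
        intro y
        rw [PySem.Set.mem_update]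
        simp only [Uk, Finset.mem_union, hseen y, hnxt y]
      have hno' : ∀ j : Nat, 1 ≤ j → j ≤ k + 1 → goal ∉ Ek bt j := by
        intro j h1 h2 hg
        rcases Nat.lt_or_ge j (k + 1) with h | h
        · exact hno j h1 (by omega) hg
        · have : j = k + 1 := by omega
          subst this
          exact hgoal ((hnxt goal).mpr hg)
      have hgrow : seen.length + 1 ≤ (PySem.Set.update seen (stepB bt cur)).length := by
        have hne : ∃ y ∈ stepB bt cur, y ∉ seen := by
          by_contra hc
          push_neg at hc
          exact hsub (issubset_true_iff.mpr hc)
        obtain ⟨y, hy, hyn⟩ := hne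
        have hss : seen.toFinset ⊂ (PySem.Set.update seen (stepB bt cur)).toFinset := by
          constructor
          · intro x hx
            rw [List.mem_toFinset] at hx ⊢
            exact (PySem.Set.mem_update _ _ _).mpr (.inl hx)
          · intro hcon
            have : y ∈ seen.toFinset := hcon (List.mem_toFinset.mpr
              ((PySem.Set.mem_update _ _ _).mpr (.inr hy)))
            exact hyn (List.mem_toFinset.mp this)
        have hcard := Finset.card_lt_card hss
        rw [List.toFinset_card_of_nodup hnd, List.toFinset_card_of_nodup hnd'] at hcard
        omega
      obtain ⟨o, ho, hgood⟩ := ih (stepB bt cur) (PySem.Set.update seen (stepB bt cur))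
        (k + 1) hnxt hnd' hseen' hno' (by omega)
      refine ⟨o, ?_, hgood⟩
      rw [← ho]
      congr 1

theorem bfs_alt_good (goal : Int) (bt : List Int) (hb : ∀ b ∈ bt, inR b) :
    ∃ o, bfs_alt goal bt = o ∧ Good goal bt o := by
  obtain ⟨o, ho, hgood⟩ := loopB_good goal bt hb (2 ^ 33 + 3) [0] [0] 0
    (by intro y; simp [Ek]) (by simp) (by intro y; simp [Uk]) (by omega) (by norm_num)
  refine ⟨o, ?_, hgood⟩
  unfold bfs_alt
  simp only [Nat.cast_zero] at ho
  rw [ho]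

-- ---------- A side ----------

-- proof-side description of one button loop: none = goal hit, some d = freshly added states
def rbAux (goal state : Int) : List Int → List Int → Option (List Int)
  | [], _ => some []
  | b :: bs, v =>
    let ns := PySem.Int.bxor state b
    if ns = goal then none
    else if ns ∈ v then rbAux goal state bs v
    else (rbAux goal state bs (v ++ [ns])).map (ns :: ·)

-- proof-side description of one whole level
def lvAux (goal : Int) (buttons : List Int) : List Int → List Int → Option (List Int)
  | [], _ => some []
  | x :: xs, v =>
    match rbAux goal x buttons v with
    | none => none
    | some d => (lvAux goal buttons xs (v ++ d)).map (d ++ ·)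

-- proof-side level recursion equivalent to loopA
def lvl (goal : Int) (buttons : List Int) : Nat → List Int → List Int → Int →
    Option (Option Int)
  | 0, _, _, _ => none
  | _ + 1, [], _, _ => some none
  | f + 1, F, v, steps =>
    match lvAux goal buttons F v with
    | none => some (some (steps + 1))
    | some d => lvl goal buttons f d (v ++ d) (steps + 1)

-- runButtonsA computed from rbAux
theorem runButtonsA_eq (goal state s : Int) (bs : List Int) (q : List (Int × Int)) (v : List Int) :
    runButtonsA goal state s bs q v =
      match rbAux goal state bs v with
      | none => .inl (s + 1)
      | some d => .inr (q ++ d.map (fun x => (x, s + 1)), v ++ d) := by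
  induction bs generalizing q v with
  | nil => simp [runButtonsA, rbAux]
  | cons b bs ih =>
    simp only [runButtonsA, rbAux]
    split_ifs with h1 h2
    · rfl
    · rw [ih]
    · rw [ih]
      cases h : rbAux goal state bs (v ++ [PySem.Int.bxor state b]) <;> simp

-- properties of the fresh states added by one button loop
theorem rbAux_prop {goal state : Int} {bs v d : List Int} (hnd : v.Nodup)
    (h : rbAux goal state bs v = some d) :
    (v ++ d).Nodup ∧ ∀ x ∈ d, ∃ b ∈ bs, x = PySem.Int.bxor state b := by
  induction bs generalizing v d with
  | nil => simp [rbAux] at h; simp [h, hnd]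
  | cons b bs ih =>
    simp only [rbAux] at h
    split_ifs at h with h1 h2
    · obtain ⟨h3, h4⟩ := ih hnd h
      exact ⟨h3, fun x hx => by obtain ⟨b', hb', he⟩ := h4 x hx; exact ⟨b', by simp [hb'], he⟩⟩
    · cases hrec : rbAux goal state bs (v ++ [PySem.Int.bxor state b]) with
      | none => simp [hrec] at h
      | some d' =>
        simp [hrec] at h
        have hnd' : (v ++ [PySem.Int.bxor state b]).Nodup := by
          rw [List.nodup_append]
          refine ⟨hnd, List.nodup_singleton _, ?_⟩
          intro a ha b hb
          rw [List.mem_singleton] at hb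
          subst hb
          exact fun he => h2 (he ▸ ha)
        obtain ⟨h3, h4⟩ := ih hnd' hrec
        subst h
        constructor
        · simpa using h3
        · intro x hx
          rcases List.mem_cons.mp hx with hx | hx
          · exact ⟨b, by simp, hx⟩
          · obtain ⟨b', hb', he⟩ := h4 x hx; exact ⟨b', by simp [hb'], he⟩

-- membership characterisation of the fresh states of one button loop
theorem rbAux_mem {goal state : Int} {bs v d : List Int}
    (h : rbAux goal state bs v = some d) :
    ∀ y, y ∈ d ↔ ((∃ b ∈ bs, y = PySem.Int.bxor state b) ∧ y ∉ v) := by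
  induction bs generalizing v d with
  | nil => simp [rbAux] at h; simp [h]
  | cons b bs ih =>
    simp only [rbAux] at h
    split_ifs at h with h1 h2
    · intro y
      rw [ih h y]
      constructor
      · rintro ⟨⟨b', hb', rfl⟩, hy⟩; exact ⟨⟨b', by simp [hb'], rfl⟩, hy⟩
      · rintro ⟨⟨b', hb', rfl⟩, hy⟩
        rcases List.mem_cons.mp hb' with rfl | hb'
        · exact absurd h2 (by exact fun h => hy h)
        · exact ⟨⟨b', hb', rfl⟩, hy⟩
    · cases hrec : rbAux goal state bs (v ++ [PySem.Int.bxor state b]) with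
      | none => simp [hrec] at h
      | some d' =>
        simp [hrec] at h
        subst h
        intro y
        rw [List.mem_cons, ih hrec y]
        constructor
        · rintro (rfl | ⟨⟨b', hb', rfl⟩, hy⟩)
          · exact ⟨⟨b, by simp, rfl⟩, h2⟩
          · simp only [List.mem_append, List.mem_singleton] at hy
            push_neg at hy
            exact ⟨⟨b', by simp [hb'], rfl⟩, hy.1⟩
        · rintro ⟨⟨b', hb', rfl⟩, hy⟩
          by_cases hcase : PySem.Int.bxor state b' = PySem.Int.bxor state b
          · exact .inl hcase
          · rcases List.mem_cons.mp hb' with rfl | hb'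
            · exact absurd rfl hcase
            · refine .inr ⟨⟨b', hb', rfl⟩, ?_⟩
              simp only [List.mem_append, List.mem_singleton]
              push_neg
              exact ⟨hy, hcase⟩

-- rbAux hits the goal exactly when some button leads there from this state
theorem rbAux_none_iff {goal state : Int} {bs v : List Int} :
    rbAux goal state bs v = none ↔ ∃ b ∈ bs, PySem.Int.bxor state b = goal := by
  induction bs generalizing v with
  | nil => simp [rbAux]
  | cons b bs ih =>
    simp only [rbAux]
    split_ifs with h1 h2
    · simp only [true_iff]; exact ⟨b, by simp, h1⟩
    · rw [ih]
      constructor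
      · rintro ⟨b', hb', he⟩; exact ⟨b', by simp [hb'], he⟩
      · rintro ⟨b', hb', he⟩
        rcases List.mem_cons.mp hb' with rfl | hb'
        · exact absurd he h1
        · exact ⟨b', hb', he⟩
    · rw [Option.map_eq_none_iff, ih]
      constructor
      · rintro ⟨b', hb', he⟩; exact ⟨b', by simp [hb'], he⟩
      · rintro ⟨b', hb', he⟩
        rcases List.mem_cons.mp hb' with rfl | hb'
        · exact absurd he h1
        · exact ⟨b', hb', he⟩

-- lvAux hits the goal exactly when some frontier state has a button leading there
theorem lvAux_none_iff {goal : Int} {bt F v : List Int} :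
    lvAux goal bt F v = none ↔ ∃ x ∈ F, ∃ b ∈ bt, PySem.Int.bxor x b = goal := by
  induction F generalizing v with
  | nil => simp [lvAux]
  | cons x xs ih =>
    simp only [lvAux]
    cases h : rbAux goal x bt v with
    | none =>
      simp only [true_iff]
      obtain ⟨b, hb, he⟩ := rbAux_none_iff.mp h
      exact ⟨x, by simp, b, hb, he⟩
    | some d =>
      rw [Option.map_eq_none_iff, ih]
      constructor
      · rintro ⟨x', hx', b, hb, he⟩; exact ⟨x', by simp [hx'], b, hb, he⟩
      · rintro ⟨x', hx', b, hb, he⟩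
        rcases List.mem_cons.mp hx' with rfl | hx'
        · exact absurd (rbAux_none_iff.mpr ⟨b, hb, he⟩) (fun hn => by rw [h] at hn; cases hn)
        · exact ⟨x', hx', b, hb, he⟩

-- membership characterisation of the fresh states of one whole level
theorem lvAux_mem {goal : Int} {bt F v d : List Int}
    (h : lvAux goal bt F v = some d) :
    ∀ y, y ∈ d ↔ ((∃ x ∈ F, ∃ b ∈ bt, y = PySem.Int.bxor x b) ∧ y ∉ v) := by
  induction F generalizing v d with
  | nil => simp [lvAux] at h; simp [h]
  | cons x xs ih =>
    simp only [lvAux] at h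
    cases h0 : rbAux goal x bt v with
    | none => simp [h0] at h
    | some d0 =>
      simp only [h0] at h
      cases hrec : lvAux goal bt xs (v ++ d0) with
      | none => simp [hrec] at h
      | some d' =>
        simp only [hrec, Option.map_some, Option.some.injEq] at h
        subst h
        intro y
        rw [List.mem_append, rbAux_mem h0 y, ih hrec y]
        constructor
        · rintro (⟨⟨b, hb, rfl⟩, hy⟩ | ⟨⟨x', hx', b, hb, rfl⟩, hy⟩)
          · exact ⟨⟨x, by simp, b, hb, rfl⟩, hy⟩
          · simp only [List.mem_append] at hy
            push_neg at hy
            exact ⟨⟨x', by simp [hx'], b, hb, rfl⟩, hy.1⟩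
        · rintro ⟨⟨x', hx', b, hb, rfl⟩, hy⟩
          by_cases hd0 : PySem.Int.bxor x' b ∈ d0
          · exact .inl ⟨(rbAux_mem h0 _).mp hd0 |>.1, hy⟩
          · rcases List.mem_cons.mp hx' with rfl | hx'
            · exact .inl ⟨⟨b, hb, rfl⟩, hy⟩
            · refine .inr ⟨⟨x', hx', b, hb, rfl⟩, ?_⟩
              simp only [List.mem_append]
              push_neg
              exact ⟨hy, hd0⟩

-- properties of the fresh states added by one whole level
theorem lvAux_prop {goal : Int} {buttons L v d : List Int} (hnd : v.Nodup)
    (hL : ∀ x ∈ L, inR x) (hb : ∀ b ∈ buttons, inR b)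
    (h : lvAux goal buttons L v = some d) :
    (v ++ d).Nodup ∧ ∀ x ∈ d, inR x := by
  induction L generalizing v d with
  | nil => simp [lvAux] at h; simp [h, hnd]
  | cons x xs ih =>
    simp only [lvAux] at h
    cases h0 : rbAux goal x buttons v with
    | none => simp [h0] at h
    | some d0 =>
      simp [h0] at h
      cases hrec : lvAux goal buttons xs (v ++ d0) with
      | none => simp [hrec] at h
      | some d' =>
        simp [hrec] at h
        obtain ⟨h1, h2⟩ := rbAux_prop hnd h0
        have hd0R : ∀ y ∈ d0, inR y := by
          intro y hy
          obtain ⟨b, hbm, he⟩ := h2 y hy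
          exact he ▸ bxor_inR (hL x (by simp)) (hb b hbm)
        obtain ⟨h3, h4⟩ := ih h1 (fun y hy => hL y (by simp [hy])) hrec
        subst h
        refine ⟨by simpa using h3, ?_⟩
        intro y hy
        rcases (by simpa using hy : y ∈ d0 ∨ y ∈ d') with hy | hy
        · exact hd0R y hy
        · exact h4 y hy

-- one level of loopA, fuel decomposed exactly
theorem loopA_level (goal : Int) (buttons : List Int) (s : Int) (L : List Int)
    (Q : List (Int × Int)) (v : List Int) (f : Nat) :
    loopA goal buttons (L.length + f) (L.map (fun x => (x, s)) ++ Q) v =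
      match lvAux goal buttons L v with
      | none => some (some (s + 1))
      | some d => loopA goal buttons f (Q ++ d.map (fun x => (x, s + 1))) (v ++ d) := by
  induction L generalizing Q v f with
  | nil => simp [lvAux]
  | cons x xs ih =>
    have hlen : (x :: xs).length + f = (xs.length + f) + 1 := by simp; omega
    rw [hlen]
    cases h : rbAux goal x buttons v with
    | none => simp [loopA, runButtonsA_eq, h, lvAux]
    | some d0 =>
      simp only [List.map_cons, List.cons_append, loopA, runButtonsA_eq, h, lvAux]
      rw [List.append_assoc, ih]
      cases lvAux goal buttons xs (v ++ d0) <;> simp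

-- fuel monotonicity of loopA
theorem loopA_mono {goal : Int} {buttons : List Int} {f : Nat} {q : List (Int × Int)}
    {v : List Int} {o : Option Int} (h : loopA goal buttons f q v = some o) :
    ∀ g, f ≤ g → loopA goal buttons g q v = some o := by
  induction f generalizing q v with
  | zero => simp [loopA] at h
  | succ f ih =>
    intro g hg
    cases g with
    | zero => omega
    | succ g =>
      cases q with
      | nil =>
        simp only [loopA] at h ⊢
        exact h
      | cons p rest =>
        obtain ⟨st, sp⟩ := p
        simp only [loopA] at h ⊢
        rcases hr : runButtonsA goal st sp buttons rest v with r | ⟨q', v'⟩ <;> rw [hr] at h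
        · exact h
        · exact ih h g (by omega)

-- simulation: a successful run of lvl is matched by loopA with bounded fuel
theorem lvl_to_loopA {goal : Int} {buttons : List Int} (fB : Nat) (L v : List Int) (s : Int)
    {o : Option Int} (hnd : v.Nodup) (hv : ∀ x ∈ v, inR x) (hL : ∀ x ∈ L, inR x)
    (hb : ∀ b ∈ buttons, inR b) (h : lvl goal buttons fB L v s = some o) :
    ∃ fA, fA + v.length ≤ L.length + 2 ^ 33 + 1 ∧
      loopA goal buttons fA (L.map (fun x => (x, s))) v = some o := by
  induction fB generalizing L v s o with
  | zero => simp [lvl] at h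
  | succ fB ih =>
    cases L with
    | nil =>
      simp only [lvl] at h
      refine ⟨1, ?_, ?_⟩
      · have := length_le_of_inR hnd hv
        simp only [List.length_nil]
        omega
      · simp only [List.map_nil, loopA]
        exact h
    | cons x xs =>
      simp only [lvl] at h
      cases hl : lvAux goal buttons (x :: xs) v with
      | none =>
        simp only [hl] at h
        refine ⟨(x :: xs).length, ?_, ?_⟩
        · have := length_le_of_inR hnd hv
          omega
        · have hstep := loopA_level goal buttons s (x :: xs) [] v 0
          simp only [hl] at hstep
          rw [← h]
          simpa using hstep
      | some d =>
        simp only [hl] at h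
        obtain ⟨hnd', hdR⟩ := lvAux_prop hnd hL hb hl
        have hv' : ∀ y ∈ v ++ d, inR y := by
          intro y hy
          rcases List.mem_append.mp hy with hy | hy
          · exact hv y hy
          · exact hdR y hy
        obtain ⟨fA1, hb1, hA1⟩ := ih d (v ++ d) (s + 1) hnd' hv' hdR h
        refine ⟨(x :: xs).length + fA1, ?_, ?_⟩
        · simp only [List.length_append] at hb1
          omega
        · have hstep := loopA_level goal buttons s (x :: xs) [] v fA1
          simp only [hl] at hstep
          simpa using hstep.trans (by simpa using hA1)

-- main A-side invariant: lvl computes a Good answer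
theorem lvl_good (goal : Int) (bt : List Int) (hb : ∀ b ∈ bt, inR b) :
    ∀ (f : Nat) (F v : List Int) (k : Nat),
      v.Nodup → (∀ y ∈ v, inR y) → (∀ y ∈ F, inR y) →
      (∀ y ∈ F, y ∈ Ek bt k ∨ y = 0) →
      (∀ x, x ∈ Ek bt k → (∀ j : Nat, j < k → x ∉ Ek bt j) → x ∈ F) →
      (∀ y ∈ v, y ∈ Uk bt k) →
      (∀ y, y ∈ Uk bt k → y ≠ 0 → y ∈ v) →
      (∀ j : Nat, 1 ≤ j → j ≤ k → goal ∉ Ek bt j) →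
      2 ^ 33 + 2 ≤ f + v.length →
      ∃ o, lvl goal bt f F v (k : Int) = some o ∧ Good goal bt o := by
  intro f
  induction f with
  | zero =>
    intro F v k hnd hvR hFR hF1 hF2 hv1 hv2 hno hf
    exfalso
    have := length_le_of_inR hnd hvR
    omega
  | succ f ih =>
    intro F v k hnd hvR hFR hF1 hF2 hv1 hv2 hno hf
    cases hFnil : F with
    | nil =>
      -- empty frontier: A returns None; level k added nothing fresh
      subst hFnil
      refine ⟨none, by simp [lvl], ?_⟩
      cases k with
      | zero => exact absurd (hF2 0 (by simp [Ek]) (by omega)) (by simp)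
      | succ m =>
        have hclosed : Ek bt (m + 1) ⊆ Uk bt m := by
          intro x hx
          by_cases hfresh : ∀ j : Nat, j < m + 1 → x ∉ Ek bt j
          · exact absurd (hF2 x hx hfresh) (by simp)
          · push_neg at hfresh
            obtain ⟨j, hj, hxj⟩ := hfresh
            exact mem_Uk.mpr ⟨j, by omega, hxj⟩
        exact no_goal_forever hclosed hno
    | cons x0 xs0 =>
      rw [← hFnil]
      have hFne : F ≠ [] := by simp [hFnil]
      simp only [lvl, hFnil]
      rw [← hFnil]
      cases hl : lvAux goal bt F v with
      | none =>
        -- hit: goal reachable from the frontier in one press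
        obtain ⟨y, hyF, b, hbm, hyb⟩ := lvAux_none_iff.mp hl
        refine ⟨some ((k : Int) + 1), rfl, k, rfl, ?_, hno⟩
        rcases hF1 y hyF with hyE | rfl
        · exact mem_Ek_succ.mpr ⟨y, hyE, b, hbm, hyb.symm⟩
        · -- y = 0 regenerated: goal ∈ Ek 1; impossible for k ≥ 1, fine for k = 0
          have hg1 : goal ∈ Ek bt 1 := mem_Ek_one.mpr (by rw [← hyb, bxor_zero_left]; exact hbm)
          cases k with
          | zero => exact hg1
          | succ m => exact absurd hg1 (hno 1 (by omega) (by omega))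
      | some d =>
        simp only [hl]
        -- establish the invariants at level k + 1
        obtain ⟨hnd', hdR⟩ := lvAux_prop hnd hFR hb hl
        have hmem := lvAux_mem hl
        have hXF : ∀ y, ((∃ x ∈ F, ∃ b ∈ bt, y = PySem.Int.bxor x b) →
            y ∈ Ek bt (k + 1) ∨ y ∈ Ek bt 1) := by
          rintro y ⟨x, hxF, b, hbm, rfl⟩
          rcases hF1 x hxF with hxE | rfl
          · exact .inl (mem_Ek_succ.mpr ⟨x, hxE, b, hbm, rfl⟩)
          · exact .inr (mem_Ek_one.mpr (by rw [bxor_zero_left]; exact hbm))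
        have hnoh : goal ∉ Ek bt (k + 1) := by
          intro hg
          obtain ⟨x, hxE, b, hbm, rfl⟩ := mem_Ek_succ.mp hg
          have hxfresh : ∀ j : Nat, j < k → x ∉ Ek bt j := by
            intro j hj hxj
            have : PySem.Int.bxor x b ∈ Ek bt (j + 1) := mem_Ek_succ.mpr ⟨x, hxj, b, hbm, rfl⟩
            rcases Nat.eq_zero_or_pos (j + 1) with h0 | _
            · omega
            · exact hno (j + 1) (by omega) (by omega) this
          have hxF := hF2 x hxE hxfresh
          exact absurd (lvAux_none_iff.mpr ⟨x, hxF, b, hbm, rfl⟩) (fun hn => by rw [hl] at hn; cases hn)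
        have hno' : ∀ j : Nat, 1 ≤ j → j ≤ k + 1 → goal ∉ Ek bt j := by
          intro j h1 h2
          rcases Nat.lt_or_ge j (k + 1) with h | h
          · exact hno j h1 (by omega)
          · have : j = k + 1 := by omega
            subst this; exact hnoh
        have hv1' : ∀ y ∈ v ++ d, y ∈ Uk bt (k + 1) := by
          intro y hy
          rcases List.mem_append.mp hy with hy | hy
          · exact Uk_mono (by omega) (hv1 y hy)
          · obtain ⟨hX, _⟩ := (hmem y).mp hy
            rcases hXF y hX with hE | hE
            · exact mem_Uk.mpr ⟨k + 1, le_refl _, hE⟩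
            · exact mem_Uk.mpr ⟨1, by omega, hE⟩
        have hv2' : ∀ y, y ∈ Uk bt (k + 1) → y ≠ 0 → y ∈ v ++ d := by
          intro y hy hy0
          simp only [Uk, Finset.mem_union] at hy
          rcases hy with hy | hy
          · exact List.mem_append.mpr (.inl (hv2 y hy hy0))
          · obtain ⟨x, hxE, b, hbm, rfl⟩ := mem_Ek_succ.mp hy
            by_cases hfresh : ∀ j : Nat, j < k → x ∉ Ek bt j
            · have hxF := hF2 x hxE hfresh
              by_cases hyv : PySem.Int.bxor x b ∈ v
              · exact List.mem_append.mpr (.inl hyv)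
              · exact List.mem_append.mpr (.inr ((hmem _).mpr ⟨⟨x, hxF, b, hbm, rfl⟩, hyv⟩))
            · push_neg at hfresh
              obtain ⟨j, hj, hxj⟩ := hfresh
              have : PySem.Int.bxor x b ∈ Ek bt (j + 1) := mem_Ek_succ.mpr ⟨x, hxj, b, hbm, rfl⟩
              exact List.mem_append.mpr (.inl (hv2 _ (mem_Uk.mpr ⟨j + 1, by omega, this⟩) hy0))
        have hF1' : ∀ y ∈ d, y ∈ Ek bt (k + 1) ∨ y = 0 := by
          intro y hy
          obtain ⟨hX, hyv⟩ := (hmem y).mp hy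
          rcases hXF y hX with hE | hE
          · exact .inl hE
          · cases k with
            | zero => exact .inl hE
            | succ m =>
              by_cases hy0 : y = 0
              · exact .inr hy0
              · exact absurd (hv2 y (mem_Uk.mpr ⟨1, by omega, hE⟩) hy0) hyv
        have hF2' : ∀ x, x ∈ Ek bt (k + 1) → (∀ j : Nat, j < k + 1 → x ∉ Ek bt j) → x ∈ d := by
          intro y hyE hyfresh
          obtain ⟨x, hxE, b, hbm, rfl⟩ := mem_Ek_succ.mp hyE
          have hxfresh : ∀ j : Nat, j < k → x ∉ Ek bt j := by
            intro j hj hxj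
            exact hyfresh (j + 1) (by omega) (mem_Ek_succ.mpr ⟨x, hxj, b, hbm, rfl⟩)
          have hxF := hF2 x hxE hxfresh
          have hyv : PySem.Int.bxor x b ∉ v := by
            intro hyv
            obtain ⟨j, hj, hyj⟩ := mem_Uk.mp (hv1 _ hyv)
            exact hyfresh j (by omega) hyj
          exact (hmem _).mpr ⟨⟨x, hxF, b, hbm, rfl⟩, hyv⟩
        have hdcast : ((k : Int) + 1) = (((k + 1 : Nat) : Int)) := by push_cast; ring
        cases hd : d with
        | nil =>
          -- next frontier empty: one more step returns None
          have hlen := length_le_of_inR hnd hvR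
          have hfpos : 1 ≤ f := by omega
          obtain ⟨g, rfl⟩ : ∃ g, f = g + 1 := ⟨f - 1, by omega⟩
          refine ⟨none, rfl, ?_⟩
          subst hd
          have hclosed : Ek bt (k + 1) ⊆ Uk bt k := by
            intro x hx
            by_cases hfresh : ∀ j : Nat, j < k + 1 → x ∉ Ek bt j
            · exact absurd (hF2' x hx hfresh) (by simp)
            · push_neg at hfresh
              obtain ⟨j, hj, hxj⟩ := hfresh
              exact mem_Uk.mpr ⟨j, by omega, hxj⟩
          exact no_goal_forever hclosed hno'
        | cons y0 ys0 =>
          rw [← hd]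
          have hdne : d.length ≥ 1 := by simp [hd]
          have hvdR : ∀ y ∈ v ++ d, inR y := by
            intro y hy
            rcases List.mem_append.mp hy with hy | hy
            · exact hvR y hy
            · exact hdR y hy
          obtain ⟨o, ho, hgood⟩ := ih d (v ++ d) (k + 1) hnd' hvdR hdR
            hF1' hF2' hv1' hv2' hno' (by simp only [List.length_append]; omega)
          refine ⟨o, ?_, hgood⟩
          rw [hdcast]
          exact ho

-- A's BFS computes a Good answer
theorem bfs_good (goal : Int) (bt : List Int) (hb : ∀ b ∈ bt, inR b) :
    ∃ o, bfs goal bt = o ∧ Good goal bt o := by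
  obtain ⟨o, ho, hgood⟩ := lvl_good goal bt hb (2 ^ 33 + 2) [0] [] 0
    (by simp) (by simp) (by intro y hy; simp only [List.mem_singleton] at hy; subst hy; exact inR_zero)
    (by intro y hy; simp only [List.mem_singleton] at hy; subst hy; exact .inr rfl)
    (by intro x hx _; simp only [Ek, Finset.mem_singleton] at hx; simp [hx])
    (by simp) (by intro y hy hy0; simp only [Uk, Finset.mem_singleton] at hy; exact absurd hy hy0)
    (by omega) (by norm_num)
  simp only [Nat.cast_zero] at ho
  obtain ⟨fA, hfA, hA⟩ := lvl_to_loopA (2 ^ 33 + 2) [0] [] 0 (by simp) (by simp)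
    (by intro y hy; simp only [List.mem_singleton] at hy; subst hy; exact inR_zero) hb ho
  have hAA : loopA goal bt (2 ^ 33 + 2) [(0, 0)] [] = some o := by
    have h2 := loopA_mono hA (2 ^ 33 + 2) (by simp at hfA; omega)
    simpa using h2
  refine ⟨o, ?_, hgood⟩
  unfold bfs
  rw [hAA]

-- ===== VERDICT (by name: the statement is the Claim_ definition above) =====
theorem bfs_spec : Claim_equal_bfs := by
  intro goal buttons hdom
  have hb : ∀ b ∈ buttons, inR b := by
    intro b hbm
    simp only [Dom_bfs, pvDomInt, Bool.and_eq_true, List.all_eq_true, decide_eq_true_eq] at hdom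
    have := hdom.2 b hbm
    unfold inR; omega
  unfold Spec_bfs
  obtain ⟨oA, hA, hgA⟩ := bfs_good goal buttons hb
  obtain ⟨oB, hB, hgB⟩ := bfs_alt_good goal buttons hb
  rw [hA, hB, good_unique hgA hgB]
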